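-- pv_equiv track=rewrite | github.com/ahill132009/Python_practice | HW2/B/B.py | solution
-- ===== SOURCE A (Python) =====
-- def solution(line):
-- 	if 'h' in line:
-- 		first_h = line.index('h')
-- 		last_h = len(line) - 1 - line[::-1].index('h')
-- 		line = line[:first_h+1] + line[first_h+1:last_h].replace('h', 'H') + line[last_h:]
-- 	list_line = list(line)
-- 	for x in range((len(list_line)-1), 1, -1):
-- 		if x % 3 == 0:
-- 			list_line.pop(x)
-- 	line = ''.join(list_line)
-- 	line = line.replace('1', 'one')
-- 	return line
-- ===== SOURCE B (Python) =====
-- def solution(line):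
--     first_h = line.find('h')
--     last_h = line.rfind('h')
--     kept = [('H' if c == 'h' and first_h < i < last_h else c)
--             for i, c in enumerate(line) if i == 0 or i % 3 != 0]
--     return ''.join(kept).replace('1', 'one')
-- ===== Notes on version B (the rewrite author's own statement) =====
-- stated objective: faster
-- what changed: B replaces A's three-phase pipeline (slice-and-concat inner-h uppercasing, a quadratic descending pop loop, then join) by one linear enumerate pass that keeps index i iff i==0 or i%3!=0 and uppercases 'h' exactly when find('h') < i < rfind('h'), followed by the same final replace.
-- intended difference: On lines containing exactly one 'h', A's slice recombination line[:f+1]+...+line[f:] duplicates that 'h' before filtering (e.g. 'ah' -> 'ahh'), while B returns the string with no duplication ('ah' -> 'ah'), which is the intended behaviour since a single 'h' has no inner h's to transform. — e.g. on solution("ah"): A returns "ahh", B returns "ah"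
import Mathlib
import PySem

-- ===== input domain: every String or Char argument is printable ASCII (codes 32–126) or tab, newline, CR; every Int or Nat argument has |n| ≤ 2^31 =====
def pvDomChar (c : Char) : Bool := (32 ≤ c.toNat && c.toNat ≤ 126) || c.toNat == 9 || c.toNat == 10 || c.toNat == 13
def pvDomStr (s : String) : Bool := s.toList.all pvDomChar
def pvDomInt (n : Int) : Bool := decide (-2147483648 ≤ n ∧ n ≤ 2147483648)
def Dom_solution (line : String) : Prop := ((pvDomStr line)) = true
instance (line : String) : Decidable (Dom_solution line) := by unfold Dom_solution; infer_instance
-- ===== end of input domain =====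

-- B fuses A's three passes (slice-based inner-h uppercasing, quadratic descending pop loop, join)
-- into one linear enumerate pass; equivalence of RETURN values is proved outside D_solution.

-- ===== PORT A =====
def solution (line : String) : String :=
  let cs := line.toList
  let cs1 :=
    if PySem.Chars.isIn ['h'] cs then
      -- line.index('h') cannot raise here ('h' in line), so it equals Chars.find
      let first_h := PySem.Chars.find cs ['h']
      -- line[::-1] is the reverse of the string
      let last_h := (cs.length : Int) - 1 - PySem.Chars.find cs.reverse ['h']
      PySem.List.slice cs none (some (first_h + 1))
        ++ PySem.Chars.replace (PySem.List.slice cs (some (first_h + 1)) (some last_h)) ['h'] ['H']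
        ++ PySem.List.slice cs (some last_h) none
    else cs
  -- for x in range(len(list_line)-1, 1, -1): if x % 3 == 0: list_line.pop(x)
  -- (pop? never returns none here since x is always in range; getD is the total form)
  let list_line := (PySem.List.pyRange ((cs1.length : Int) - 1) 1 (-1)).foldl
      (fun l x => if PySem.Int.mod x 3 = 0 then ((PySem.List.pop? l x).map Prod.snd).getD l else l) cs1
  String.ofList (PySem.Chars.replace list_line ['1'] ['o','n','e'])

-- ===== PORT B =====
def solution_alt (line : String) : String :=
  let cs := line.toList
  let first_h := PySem.Chars.find cs ['h']
  let last_h := PySem.Chars.rfind cs ['h']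
  let kept := (PySem.List.enumerate cs 0).filterMap (fun p =>
    if p.1 = 0 ∨ PySem.Int.mod p.1 3 ≠ 0 then
      some (if p.2 = 'h' ∧ first_h < p.1 ∧ p.1 < last_h then 'H' else p.2)
    else none)
  String.ofList (PySem.Chars.replace kept ['1'] ['o','n','e'])

-- ===== PRECONDITION & SPEC =====
-- On lines containing exactly one 'h', A's slice recombination line[:f+1]+…+line[f:] duplicates
-- that 'h' before filtering (e.g. 'ah' -> 'ahh'), while B returns the string with no duplication
-- ('ah' -> 'ah'), which is the intended behaviour since a single 'h' has no inner h's to transform.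
def D_solution (line : String) : Prop := line.toList.count 'h' = 1
instance (line : String) : Decidable (D_solution line) := by unfold D_solution; infer_instance
def Spec_solution (line : String) (out : String) : Prop := ¬ D_solution line → out = solution_alt line
instance (line : String) (out : String) : Decidable (Spec_solution line out) := by unfold Spec_solution; infer_instance
def pvDiffWitness_solution : String := "ah"
def pvDiffWitnessOut_solution : String × String := ("ahh", "ah")

-- ===== CLAIM (what is proved, stated in full; the proofs are below) =====
def Claim_unchanged_solution : Prop := ∀ (line : String), Dom_solution line → Spec_solution line (solution line)
def Claim_changed_solution : Prop := Dom_solution (pvDiffWitness_solution) ∧ D_solution (pvDiffWitness_solution) ∧ solution (pvDiffWitness_solution) = pvDiffWitnessOut_solution.1 ∧ solution_alt (pvDiffWitness_solution) = pvDiffWitnessOut_solution.2 ∧ pvDiffWitnessOut_solution.1 ≠ pvDiffWitnessOut_solution.2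

-- ===== LEMMAS AND PROOFS =====

theorem pvMod3 (i : Nat) : PySem.Int.mod (i : Int) 3 = ((i % 3 : Nat) : Int) := by
  simp only [PySem.Int.mod, Int.fmod_eq_emod]
  norm_num
def pvFilt (l : List Char) : List Char :=
  l.zipIdx.filterMap (fun p => if 2 ≤ p.2 ∧ p.2 % 3 = 0 then none else some p.1)
theorem pvFilt_short (l : List Char) (h : l.length ≤ 2) : pvFilt l = l := by
  rcases l with _ | ⟨a, _ | ⟨b, _ | ⟨c, t⟩⟩⟩ <;> simp_all [pvFilt, List.zipIdx]
theorem pvFilt_append_keep (l : List Char) (x : Char) (h : ¬ (2 ≤ l.length ∧ l.length % 3 = 0)) :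
    pvFilt (l ++ [x]) = pvFilt l ++ [x] := by
  simp [pvFilt, List.zipIdx_append, List.filterMap_append, List.zipIdx, h]
theorem pvFilt_append_drop (l : List Char) (x : Char) (h : 2 ≤ l.length ∧ l.length % 3 = 0) :
    pvFilt (l ++ [x]) = pvFilt l := by
  simp [pvFilt, List.zipIdx_append, List.filterMap_append, List.zipIdx, h]
theorem pvLoop (k : Nat) : ∀ (l : List Char), k < l.length →
    (PySem.List.pyRange (k : Int) 1 (-1)).foldl
      (fun l x => if PySem.Int.mod x 3 = 0 then ((PySem.List.pop? l x).map Prod.snd).getD l else l) l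
    = pvFilt (l.take (k+1)) ++ l.drop (k+1) := by
  induction k with
  | zero =>
    intro l hl
    rw [PySem.List.pyRange_neg_one_eq_nil (by norm_num)]
    rw [List.foldl_nil, pvFilt_short (l.take 1) (by simp), List.take_append_drop]
  | succ k ih =>
    intro l hl
    by_cases hk : k = 0
    · subst hk
      rw [PySem.List.pyRange_neg_one_eq_nil (by norm_num)]
      rw [List.foldl_nil, pvFilt_short (l.take 2) (by simp), List.take_append_drop]
    · have h1 : (1 : Int) < ((k+1 : Nat) : Int) := by omega
      rw [show ((k+1 : Nat) : Int) = ((k:Int) + 1) by push_cast; ring] at h1 ⊢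
      rw [PySem.List.pyRange_neg_one_cons h1]
      simp only [List.foldl_cons]
      rw [show ((k:Int) + 1 - 1) = (k : Int) by ring]
      have hmod : PySem.Int.mod ((k:Int)+1) 3 = (((k+1) % 3 : Nat) : Int) := by
        rw [show ((k:Int) + 1) = ((k+1 : Nat) : Int) by push_cast; ring, pvMod3]
      by_cases h3 : (k+1) % 3 = 0
      · -- pop index k+1
        have hp : PySem.List.pop? l ((k:Int)+1) = some (l[k+1], l.eraseIdx (k+1)) := by
          rw [show ((k:Int) + 1) = ((k+1 : Nat) : Int) by push_cast; ring]
          exact PySem.List.pop?_natCast l (k+1) hl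
        rw [if_pos (by rw [hmod, h3]; rfl), hp]
        simp only [Option.map_some, Option.getD_some]
        have hlen : l.eraseIdx (k+1) = l.take (k+1) ++ l.drop (k+2) := by
          rw [List.eraseIdx_eq_take_drop_succ]
        rw [hlen]
        have hlen2 : k < (l.take (k+1) ++ l.drop (k+2)).length := by
          simp; omega
        rw [ih _ hlen2]
        have htk : (l.take (k+1) ++ l.drop (k+2)).take (k+1) = l.take (k+1) := by
          rw [List.take_append_of_le_length (by simp; omega), List.take_take]
          simp
        have hdk : (l.take (k+1) ++ l.drop (k+2)).drop (k+1) = l.drop (k+2) := by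
          rw [List.drop_append_of_le_length (by simp; omega)]
          simp
        rw [htk, hdk]
        congr 1
        -- pvFilt (l.take (k+1)) = pvFilt (l.take (k+2))  since index k+1 is dropped
        have : l.take (k+2) = l.take (k+1) ++ [l[k+1]] := by
          rw [List.take_add_one]
          simp [List.getElem?_eq_getElem hl]
        rw [this, pvFilt_append_drop _ _ (by simp only [List.length_take]; omega)]
      · rw [if_neg (by rw [hmod]; intro hc; apply h3; omega)]
        rw [ih _ (by omega)]
        have : l.take (k+2) = l.take (k+1) ++ [l[k+1]] := by
          rw [List.take_add_one]
          simp [List.getElem?_eq_getElem hl]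
        rw [this, pvFilt_append_keep _ _ (by simp only [List.length_take]; omega)]
        have : l.drop (k+1) = l[k+1] :: l.drop (k+2) := by
          rw [List.drop_eq_getElem_cons hl]
        rw [this]
        simp
theorem pvLoop_full (l : List Char) :
    (PySem.List.pyRange ((l.length : Int) - 1) 1 (-1)).foldl
      (fun l x => if PySem.Int.mod x 3 = 0 then ((PySem.List.pop? l x).map Prod.snd).getD l else l) l
    = pvFilt l := by
  rcases l with _ | ⟨a, t⟩
  · rw [PySem.List.pyRange_neg_one_eq_nil (by norm_num)]
    simp [pvFilt]
  · have h : ((a :: t).length : Int) - 1 = (((a :: t).length - 1 : Nat) : Int) := by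
      simp
    rw [h, pvLoop _ _ (by simp)]
    simp [List.take_of_length_le, List.drop_of_length_le]
theorem pvSinglePrefix (c : Char) (l : List Char) : [c] <+: l ↔ l.head? = some c := by
  rcases l with _ | ⟨a, t⟩
  · simp
  · constructor
    · rintro ⟨s, hs⟩
      simp at hs
      simp [hs.1]
    · intro h
      simp at h
      exact ⟨t, by simp [h]⟩
theorem pvSingleInfix (c : Char) (l : List Char) : [c] <:+: l ↔ c ∈ l := by
  constructor
  · rintro ⟨p, s, rfl⟩
    simp
  · intro h
    obtain ⟨p, s, rfl⟩ := List.append_of_mem h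
    exact ⟨p, s, by simp⟩
theorem pvFindSpec (cs : List Char) (c : Char) (h : c ∈ cs) :
    ∃ F : Nat, PySem.Chars.find cs [c] = (F : Int) ∧ F < cs.length ∧ cs[F]? = some c ∧
      ∀ i < F, cs[i]? ≠ some c := by
  have h0 : 0 ≤ PySem.Chars.find cs [c] :=
    (PySem.Chars.find_nonneg_iff cs [c]).mpr ((pvSingleInfix c cs).mpr h)
  obtain ⟨h1, h2⟩ := PySem.Chars.find_spec h0
  rw [pvSinglePrefix, List.head?_drop] at h1
  obtain ⟨hlt, -⟩ := List.getElem?_eq_some_iff.mp h1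
  refine ⟨(PySem.Chars.find cs [c]).toNat, by omega, hlt, h1, ?_⟩
  intro i hi hbad
  exact h2 i hi ((pvSinglePrefix c _).mpr (by rwa [List.head?_drop]))
theorem pvRfindGo (c : Char) (j : Nat) (s : List Char) :
    (PySem.Chars.rfind.go s [c] j = -1 ∧ ∀ i ≤ j, s[i]? ≠ some c) ∨
    (∃ L : Nat, L ≤ j ∧ PySem.Chars.rfind.go s [c] j = (L : Int) ∧ s[L]? = some c ∧
      ∀ i, L < i → i ≤ j → s[i]? ≠ some c) := by
  induction j with
  | zero =>
    by_cases h : [c].isPrefixOf s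
    · right
      refine ⟨0, le_refl _, ?_, ?_, ?_⟩
      · simp [PySem.Chars.rfind.go, h]
      · have := (pvSinglePrefix c s).mp (List.isPrefixOf_iff_prefix.mp h)
        simpa [← List.head?_drop (i := 0)] using this
      · omega
    · left
      constructor
      · simp [PySem.Chars.rfind.go, h]
      · intro i hi hbad
        apply h
        rw [List.isPrefixOf_iff_prefix, pvSinglePrefix]
        interval_cases i
        rwa [← List.head?_drop (i := 0)] at hbad
  | succ j ih =>
    by_cases h : [c].isPrefixOf (s.drop (j+1))
    · right
      have hc : s[j+1]? = some c := by
        have := (pvSinglePrefix c _).mp (List.isPrefixOf_iff_prefix.mp h)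
        rwa [List.head?_drop] at this
      refine ⟨j+1, le_refl _, ?_, hc, by omega⟩
      simp [PySem.Chars.rfind.go, h]
    · have hnc : s[j+1]? ≠ some c := by
        intro hbad
        exact h (List.isPrefixOf_iff_prefix.mpr ((pvSinglePrefix c _).mpr (by rwa [List.head?_drop])))
      have hgo : PySem.Chars.rfind.go s [c] (j+1) = PySem.Chars.rfind.go s [c] j := by
        simp [PySem.Chars.rfind.go, h]
      rcases ih with ⟨h1, h2⟩ | ⟨L, hL, h1, h2, h3⟩
      · left
        refine ⟨by rw [hgo]; exact h1, ?_⟩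
        intro i hi
        rcases Nat.lt_or_ge i (j+1) with hlt | hge
        · exact h2 i (by omega)
        · have : i = j + 1 := by omega
          rw [this]; exact hnc
      · right
        refine ⟨L, by omega, by rw [hgo]; exact h1, h2, ?_⟩
        intro i hi hij
        rcases Nat.lt_or_ge i (j+1) with hlt | hge
        · exact h3 i hi (by omega)
        · have : i = j + 1 := by omega
          rw [this]; exact hnc
theorem pvReplaceGo (c d : Char) (fuel : Nat) : ∀ (l acc : List Char), l.length ≤ fuel →
    PySem.Chars.replace.go [c] [d] fuel l acc
      = acc.reverse ++ l.map (fun x => if x = c then d else x) := by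
  induction fuel with
  | zero =>
    intro l acc hl
    have hnil : l = [] := List.length_eq_zero_iff.mp (by omega)
    subst hnil
    simp [PySem.Chars.replace.go]
  | succ fuel ih =>
    intro l acc hl
    rcases l with _ | ⟨a, t⟩
    · simp [PySem.Chars.replace.go]
    · by_cases h : a = c
      · subst h
        have hp : [a].isPrefixOf (a :: t) = true := by simp [List.isPrefixOf]
        simp only [PySem.Chars.replace.go, hp, if_pos]
        rw [show List.drop [a].length (a :: t) = t by simp]
        rw [ih t _ (by simpa using hl)]
        simp
      · have hp : [c].isPrefixOf (a :: t) = false := by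
          simp [List.isPrefixOf]
          exact fun hh => absurd hh.symm h
        simp only [PySem.Chars.replace.go, hp]
        rw [if_neg (by simp), ih t _ (by simpa using hl)]
        simp [h]
theorem pvReplaceSingle (c d : Char) (l : List Char) :
    PySem.Chars.replace l [c] [d] = l.map (fun x => if x = c then d else x) := by
  rw [PySem.Chars.replace]
  simp only [List.isEmpty_iff]
  rw [if_neg (by simp)]
  exact pvReplaceGo c d l.length l [] (le_refl _)
theorem pvKept (cs cs1 : List Char) (fh lh : Int)
    (hlen : cs1.length = cs.length)
    (hpt : ∀ i (hi : i < cs.length), cs1[i]'(by rw [hlen]; exact hi)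
      = (if cs[i]'hi = 'h' ∧ fh < (i:Int) ∧ (i:Int) < lh then 'H' else cs[i]'hi)) :
    pvFilt cs1 = (PySem.List.enumerate cs 0).filterMap (fun p =>
      if p.1 = 0 ∨ PySem.Int.mod p.1 3 ≠ 0 then
        some (if p.2 = 'h' ∧ fh < p.1 ∧ p.1 < lh then 'H' else p.2)
      else none) := by
  rw [PySem.List.enumerate_eq_zipIdx_map, List.filterMap_map]
  have hzip : cs1.zipIdx = cs.zipIdx.map
      (fun p => ((if p.1 = 'h' ∧ fh < (p.2:Int) ∧ ((p.2:Int)) < lh then 'H' else p.1), p.2)) := by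
    apply List.ext_getElem (by simp [hlen])
    intro i h1 h2
    simp only [List.getElem_zipIdx, List.getElem_map]
    have hi : i < cs.length := by simp at h2; omega
    have := hpt i hi
    simp only [Prod.mk.injEq]
    constructor
    · simpa using this
    · simp
  rw [pvFilt, hzip, List.filterMap_map]
  congr 1
  funext p
  obtain ⟨x, i⟩ := p
  simp only [Function.comp_apply, zero_add, pvMod3]
  by_cases h : 2 ≤ i ∧ i % 3 = 0
  · have hc : ¬((i:Int) = 0 ∨ ((i % 3 : Nat) : Int) ≠ 0) := by push_cast; omega
    rw [if_pos h, if_neg hc]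
  · have hc : ((i:Int) = 0 ∨ ((i % 3 : Nat) : Int) ≠ 0) := by push_cast; omega
    rw [if_neg h, if_pos hc]
theorem pvCore (cs : List Char) (hcount : cs.count 'h' ≠ 1) :
    (PySem.List.pyRange ((((if PySem.Chars.isIn ['h'] cs then
        PySem.List.slice cs none (some (PySem.Chars.find cs ['h'] + 1))
          ++ PySem.Chars.replace (PySem.List.slice cs (some (PySem.Chars.find cs ['h'] + 1))
              (some ((cs.length : Int) - 1 - PySem.Chars.find cs.reverse ['h']))) ['h'] ['H']
          ++ PySem.List.slice cs (some ((cs.length : Int) - 1 - PySem.Chars.find cs.reverse ['h'])) none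
      else cs)).length : Int) - 1) 1 (-1)).foldl
      (fun l x => if PySem.Int.mod x 3 = 0 then ((PySem.List.pop? l x).map Prod.snd).getD l else l)
      (if PySem.Chars.isIn ['h'] cs then
        PySem.List.slice cs none (some (PySem.Chars.find cs ['h'] + 1))
          ++ PySem.Chars.replace (PySem.List.slice cs (some (PySem.Chars.find cs ['h'] + 1))
              (some ((cs.length : Int) - 1 - PySem.Chars.find cs.reverse ['h']))) ['h'] ['H']
          ++ PySem.List.slice cs (some ((cs.length : Int) - 1 - PySem.Chars.find cs.reverse ['h'])) none
      else cs)
    = (PySem.List.enumerate cs 0).filterMap (fun p =>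
        if p.1 = 0 ∨ PySem.Int.mod p.1 3 ≠ 0 then
          some (if p.2 = 'h' ∧ PySem.Chars.find cs ['h'] < p.1 ∧ p.1 < PySem.Chars.rfind cs ['h'] then 'H' else p.2)
        else none) := by
  set cs1 := (if PySem.Chars.isIn ['h'] cs then
        PySem.List.slice cs none (some (PySem.Chars.find cs ['h'] + 1))
          ++ PySem.Chars.replace (PySem.List.slice cs (some (PySem.Chars.find cs ['h'] + 1))
              (some ((cs.length : Int) - 1 - PySem.Chars.find cs.reverse ['h']))) ['h'] ['H']
          ++ PySem.List.slice cs (some ((cs.length : Int) - 1 - PySem.Chars.find cs.reverse ['h'])) none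
      else cs) with hcs1
  rw [pvLoop_full cs1]
  by_cases hm : 'h' ∈ cs
  · -- 'h' occurs; with hcount it occurs at least twice, so first index < last index
    have hguard : PySem.Chars.isIn ['h'] cs = true :=
      (PySem.Chars.isIn_iff_infix _ _).mpr ((pvSingleInfix _ _).mpr hm)
    obtain ⟨F, hFeq, hFlt, hFget, hFmin⟩ := pvFindSpec cs 'h' hm
    have hmr : 'h' ∈ cs.reverse := by simpa using hm
    obtain ⟨r, hreq, hrlt, hrget, hrmin⟩ := pvFindSpec cs.reverse 'h' hmr
    rw [List.length_reverse] at hrlt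
    set n := cs.length with hn
    set L := n - 1 - r with hL
    have hLget : cs[L]? = some 'h' := by
      rwa [List.getElem?_reverse (by omega)] at hrget
    have hLmax : ∀ i, L < i → i < n → cs[i]? ≠ some 'h' := by
      intro i h1 h2 hbad
      refine hrmin (n - 1 - i) (by omega) ?_
      rw [List.getElem?_reverse (by omega)]
      have heq : cs.length - 1 - (n - 1 - i) = i := by omega
      rw [heq]
      exact hbad
    have hLlt : L < n := by omega
    have hFle : F ≤ L := by
      by_contra hc
      exact hFmin L (by omega) hLget
    have hFL : F < L := by
      rcases Nat.lt_or_ge F L with h | h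
      · exact h
      · exfalso
        have hFLeq : L = F := by omega
        have hF : cs[F] = 'h' := by
          have := List.getElem?_eq_getElem (l := cs) (i := F) hFlt
          rw [this] at hFget; exact Option.some.inj hFget
        have h1 : (cs.take F).count 'h' = 0 := by
          rw [List.count_eq_zero]
          intro hmem'
          obtain ⟨i, hilen, hieq⟩ := List.mem_iff_getElem.mp hmem'
          have hiF : i < F := by simp at hilen; omega
          refine hFmin i hiF ?_
          rw [List.getElem?_eq_getElem (by omega)]
          rw [List.getElem_take] at hieq
          rw [hieq]
        have h2 : (cs.drop (F+1)).count 'h' = 0 := by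
          rw [List.count_eq_zero]
          intro hmem'
          obtain ⟨i, hilen, hieq⟩ := List.mem_iff_getElem.mp hmem'
          have hin : F + 1 + i < n := by simp at hilen; omega
          refine hLmax (F+1+i) (by omega) hin ?_
          rw [List.getElem?_eq_getElem (by omega), ← hieq]
          simp
        have : cs.count 'h' = 1 := by
          conv_lhs => rw [← List.take_append_drop F cs, List.drop_eq_getElem_cons hFlt]
          rw [List.count_append, List.count_cons]
          simp [h1, h2, hF]
        exact hcount this
    -- rfind = L
    have hlh : PySem.Chars.rfind cs ['h'] = (L : Int) := by
      have hgo := pvRfindGo 'h' n cs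
      rcases hgo with ⟨_, hall⟩ | ⟨L', hL'le, hgoeq, hL'get, hL'max⟩
      · exact absurd hLget (hall L (by omega))
      · have hL'lt : L' < n := by
          obtain ⟨h, -⟩ := List.getElem?_eq_some_iff.mp hL'get
          omega
        have : L' = L := by
          rcases Nat.lt_trichotomy L' L with h | h | h
          · exact absurd hLget (hL'max L h (by omega))
          · exact h
          · exact absurd hL'get (hLmax L' h hL'lt)
        rw [PySem.Chars.rfind, ← hn, hgoeq, this]
    have hlast : (n : Int) - 1 - PySem.Chars.find cs.reverse ['h'] = ((L : Nat) : Int) := by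
      rw [hreq]; omega
    have hcs1' : cs1 = cs.take (F+1)
        ++ ((cs.drop (F+1)).take (L-(F+1))).map (fun x => if x = 'h' then 'H' else x)
        ++ cs.drop L := by
      rw [hcs1, if_pos hguard, hlast, hFeq]
      rw [show (F : Int) + 1 = ((F+1 : Nat) : Int) by push_cast; ring]
      rw [PySem.List.slice_to_natCast, PySem.List.slice_natCast, PySem.List.slice_from_natCast]
      rw [pvReplaceSingle]
    have hlen : cs1.length = cs.length := by
      rw [hcs1']; simp; omega
    rw [pvKept cs cs1 (PySem.Chars.find cs ['h']) (PySem.Chars.rfind cs ['h']) hlen ?_]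
    intro i hi
    rw [hFeq, hlh]
    have hl1 : (cs.take (F+1)).length = F+1 := by simp; omega
    have hl2 : (((cs.drop (F+1)).take (L-(F+1))).map (fun x => if x = 'h' then 'H' else x)).length
        = L - (F+1) := by simp; omega
    rcases Nat.lt_or_ge i (F+1) with hseg | hseg1
    · have : cs1[i]'(by omega) = cs[i]'hi := by
        rw [List.getElem_of_eq hcs1' (by omega)]
        rw [List.getElem_append_left (by rw [List.length_append, hl1, hl2]; omega)]
        rw [List.getElem_append_left (by rw [hl1]; omega)]
        exact List.getElem_take
      rw [this, if_neg]
      rintro ⟨-, hc, -⟩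
      have := Nat.cast_lt.mp (show ((F:Int) < (i:Int)) from hc)
      omega
    · rcases Nat.lt_or_ge i L with hseg2 | hseg2
      · have : cs1[i]'(by omega) = (if cs[i]'hi = 'h' then 'H' else cs[i]'hi) := by
          rw [List.getElem_of_eq hcs1' (by omega)]
          rw [List.getElem_append_left (by rw [List.length_append, hl1, hl2]; omega)]
          rw [List.getElem_append_right (by rw [hl1]; omega)]
          rw [List.getElem_map, List.getElem_take, List.getElem_drop]
          have harith : F + 1 + (i - (cs.take (F+1)).length) = i := by rw [hl1]; omega
          simp only [harith]
        rw [this]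
        by_cases hch : cs[i]'hi = 'h'
        · rw [if_pos hch, if_pos ⟨hch, by omega, by omega⟩]
        · rw [if_neg hch, if_neg (fun hc => hch hc.1)]
      · have : cs1[i]'(by omega) = cs[i]'hi := by
          rw [List.getElem_of_eq hcs1' (by omega)]
          rw [List.getElem_append_right (by rw [List.length_append, hl1, hl2]; omega)]
          rw [List.getElem_drop]
          congr 1
          rw [List.length_append, hl1, hl2]
          omega
        rw [this, if_neg]
        rintro ⟨-, -, hc⟩
        have := Nat.cast_lt.mp (show ((i:Int) < (L:Int)) from hc)
        omega
  · -- no 'h' at all: step 1 is skipped and B's uppercase guard never fires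
    have hguard : PySem.Chars.isIn ['h'] cs = false :=
      (PySem.Chars.isIn_eq_false_iff _ _).mpr (fun hinf => hm ((pvSingleInfix _ _).mp hinf))
    have hcs1' : cs1 = cs := by rw [hcs1, if_neg (by simp [hguard])]
    rw [pvKept cs cs1 (PySem.Chars.find cs ['h']) (PySem.Chars.rfind cs ['h']) (by rw [hcs1']) ?_]
    intro i hi
    have hcnd : ¬(cs[i]'hi = 'h' ∧ PySem.Chars.find cs ['h'] < (i:Int) ∧ (i:Int) < PySem.Chars.rfind cs ['h']) := by
      rintro ⟨hc, -, -⟩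
      exact hm (hc ▸ List.getElem_mem hi)
    rw [List.getElem_of_eq hcs1' (by rw [hcs1']; exact hi), if_neg hcnd]

-- ===== VERDICT (by name: the statement is the Claim_ definition above) =====
theorem solution_spec : Claim_unchanged_solution := by
  intro line _ hD
  exact congrArg (fun l => String.ofList (PySem.Chars.replace l ['1'] ['o','n','e'])) (pvCore line.toList hD)

theorem solution_changed : Claim_changed_solution := by
  unfold Claim_changed_solution; decide
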